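-- pv_equiv track=rewrite | github.com/howe-s/NeoFeed | utils/satellite_positions.py | parse_tle_data
-- ===== SOURCE A (Python) =====
-- def parse_tle_data(tle_text):
--     lines = tle_text.splitlines()
--     tle_entries = []
--
--     for i in range(0, len(lines), 3):
--         if i + 2 < len(lines):
--             name = lines[i].strip()
--             line1 = lines[i + 1].strip()
--             line2 = lines[i + 2].strip()
--             tle_entries.append({
--                 'name': name,
--                 'line1': line1,
--                 'line2': line2
--             })
--
--     return tle_entries
-- ===== SOURCE B (Python) =====
-- def parse_tle_data(tle_text):
--     it = iter(tle_text.splitlines())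
--     tle_entries = []
--     while True:
--         try:
--             name = next(it)
--             line1 = next(it)
--             line2 = next(it)
--         except StopIteration:
--             break
--         tle_entries.append({
--             'name': name.strip(),
--             'line1': line1.strip(),
--             'line2': line2.strip()
--         })
--     return tle_entries
-- ===== Notes on version B (the rewrite author's own statement) =====
-- stated objective: idiomatic
-- what changed: B consumes the line iterator three at a time inside a while/try-next loop instead of indexing the list with range(0,len,3) and an i+2 bounds guard.
import Mathlib
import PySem

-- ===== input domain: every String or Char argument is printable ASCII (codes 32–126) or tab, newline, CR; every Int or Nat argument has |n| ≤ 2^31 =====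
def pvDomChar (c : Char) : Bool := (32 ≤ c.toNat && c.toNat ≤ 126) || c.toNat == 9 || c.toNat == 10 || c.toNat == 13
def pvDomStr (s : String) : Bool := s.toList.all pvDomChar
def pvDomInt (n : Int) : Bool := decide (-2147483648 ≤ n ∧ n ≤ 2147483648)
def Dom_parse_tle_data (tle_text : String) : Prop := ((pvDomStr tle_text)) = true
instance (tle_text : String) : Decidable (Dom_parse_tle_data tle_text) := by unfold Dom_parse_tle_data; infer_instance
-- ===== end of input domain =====

-- B replaces A's range(0,len,3) indexing + i+2 guard by consuming the lines three at a time (idiomatic decomposition; same cost).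

-- ===== PORT A =====
-- A: loop i over range(0, len(lines), 3); if i+2 < len(lines), append the dict of stripped lines[i..i+2].
def parse_tle_data (tle_text : String) : List (List (String × String)) :=
  let lines := PySem.Str.splitlines tle_text
  (PySem.List.pyRange 0 lines.length 3).foldl
    (fun acc i =>
      if i + 2 < (lines.length : Int) then
        acc ++ [[("name", PySem.Str.strip (PySem.List.pyGetD lines i "")),
                 ("line1", PySem.Str.strip (PySem.List.pyGetD lines (i + 1) "")),
                 ("line2", PySem.Str.strip (PySem.List.pyGetD lines (i + 2) ""))]]
      else acc)
    []

-- ===== PORT B =====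
-- B: consume the line list three at a time (the iterator's next/next/next step); stop when fewer than three remain.
def parse_tle_chunks : List String → List (List (String × String))
  | name :: line1 :: line2 :: rest =>
      [("name", PySem.Str.strip name),
       ("line1", PySem.Str.strip line1),
       ("line2", PySem.Str.strip line2)] :: parse_tle_chunks rest
  | _ => []

def parse_tle_data_alt (tle_text : String) : List (List (String × String)) :=
  parse_tle_chunks (PySem.Str.splitlines tle_text)

-- ===== PRECONDITION & SPEC =====
def Spec_parse_tle_data (tle_text : String) (out : List (List (String × String))) : Prop := out = parse_tle_data_alt tle_text
instance (tle_text : String) (out : List (List (String × String))) : Decidable (Spec_parse_tle_data tle_text out) := by unfold Spec_parse_tle_data; infer_instance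

-- ===== CLAIM (what is proved, stated in full; the proofs are below) =====
def Claim_equal_parse_tle_data : Prop := ∀ (tle_text : String), Dom_parse_tle_data tle_text → Spec_parse_tle_data tle_text (parse_tle_data tle_text)

-- ===== LEMMAS AND PROOFS =====

-- A's body over any line list equals B's three-at-a-time recursion.
theorem loopA_eq_chunks (ls : List String) (acc : List (List (String × String))) :
    (PySem.List.pyRange 0 ls.length 3).foldl
      (fun acc i =>
        if i + 2 < (ls.length : Int) then
          acc ++ [[("name", PySem.Str.strip (PySem.List.pyGetD ls i "")),
                   ("line1", PySem.Str.strip (PySem.List.pyGetD ls (i + 1) "")),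
                   ("line2", PySem.Str.strip (PySem.List.pyGetD ls (i + 2) ""))]]
        else acc)
      acc = acc ++ parse_tle_chunks ls := by
  induction ls using parse_tle_chunks.induct generalizing acc with
  | case1 name l1 l2 rest ih =>
    simp only [List.length_cons, parse_tle_chunks]
    rw [PySem.List.pyRange_of_pos _ _ (by norm_num : (0:Int) < 3)]
    have hc : (if (0:Int) < ((rest.length + 1 + 1 + 1 : Nat) : Int) then
        ((((rest.length + 1 + 1 + 1 : Nat) : Int) - 0 + 3 - 1) / 3).toNat else 0)
        = (rest.length + 2) / 3 + 1 := by
      rw [if_pos (by push_cast; omega)]; omega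
    rw [hc, List.range_succ_eq_map, List.map_cons, List.foldl_cons, List.map_map]
    have h0 : ((0:Int) + 3 * ((0:Nat):Int) + 2 < ((rest.length + 1 + 1 + 1 : Nat) : Int)) := by
      push_cast; omega
    rw [if_pos h0]
    have hget : ∀ (j : Nat), PySem.List.pyGetD (name :: l1 :: l2 :: rest) ((0:Int) + 3 * ((0:Nat):Int) + (j:Int)) ""
        = (name :: l1 :: l2 :: rest).getD j "" := by
      intro j
      have : (0:Int) + 3 * ((0:Nat):Int) + (j:Int) = ((j:Nat):Int) := by push_cast; ring
      rw [this, PySem.List.pyGetD_natCast]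
    have e0 := hget 0; have e1 := hget 1; have e2 := hget 2
    simp only [Nat.cast_zero, Nat.cast_one, Nat.cast_ofNat, add_zero] at e0 e1 e2 ⊢
    rw [e1, e2]
    have e0' : PySem.List.pyGetD (name :: l1 :: l2 :: rest) (0 + 3 * 0) "" = name := by
      norm_num [PySem.List.pyGetD_ofNat']
    rw [e0']
    simp only [List.getD_cons_succ, List.getD_cons_zero]
    rw [show acc ++ [("name", PySem.Str.strip name), ("line1", PySem.Str.strip l1),
          ("line2", PySem.Str.strip l2)] :: parse_tle_chunks rest
        = (acc ++ [[("name", PySem.Str.strip name), ("line1", PySem.Str.strip l1),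
          ("line2", PySem.Str.strip l2)]]) ++ parse_tle_chunks rest by simp]
    rw [← ih]
    rw [PySem.List.pyRange_of_pos _ _ (by norm_num : (0:Int) < 3)]
    have hc2 : (if (0:Int) < ((rest.length : Nat) : Int) then
        ((((rest.length : Nat) : Int) - 0 + 3 - 1) / 3).toNat else 0) = (rest.length + 2) / 3 := by
      split_ifs with h
      · omega
      · omega
    rw [hc2, List.foldl_map, List.foldl_map]
    apply PySem.List.foldl_congr_mem
    intro acc2 k hk
    have hcast1 : (0:Int) + 3 * ((Nat.succ k : Nat) : Int) = ((3*k+3 : Nat) : Int) := by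
      push_cast; ring
    have hcast2 : (0:Int) + 3 * ((k : Nat) : Int) = ((3*k : Nat) : Int) := by
      push_cast; ring
    simp only [Function.comp]
    rw [hcast1, hcast2]
    have hcond : (((3*k+3 : Nat) : Int) + 2 < ((rest.length + 1 + 1 + 1 : Nat) : Int))
        ↔ (((3*k : Nat) : Int) + 2 < ((rest.length : Nat) : Int)) := by
      constructor <;> (intro h; push_cast at h ⊢; omega)
    have hshift : ∀ (j : Nat), PySem.List.pyGetD (name :: l1 :: l2 :: rest) (((3*k+3 : Nat) : Int) + (j:Int)) ""
        = PySem.List.pyGetD rest (((3*k : Nat) : Int) + (j:Int)) "" := by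
      intro j
      have a1 : ((3*k+3 : Nat) : Int) + (j:Int) = ((3*k+j+3 : Nat) : Int) := by push_cast; ring
      have a2 : ((3*k : Nat) : Int) + (j:Int) = ((3*k+j : Nat) : Int) := by push_cast; ring
      rw [a1, a2, PySem.List.pyGetD_natCast, PySem.List.pyGetD_natCast]
      show (name :: l1 :: l2 :: rest).getD (3*k+j+1+1+1) "" = rest.getD (3*k+j) ""
      simp
    have s0 : PySem.List.pyGetD (name :: l1 :: l2 :: rest) ((3*k+3 : Nat) : Int) ""
        = PySem.List.pyGetD rest ((3*k : Nat) : Int) "" := by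
      have := hshift 0; simpa using this
    have s1 := hshift 1; have s2 := hshift 2
    simp only [Nat.cast_one, Nat.cast_ofNat] at s1 s2
    by_cases h : ((3*k : Nat) : Int) + 2 < ((rest.length : Nat) : Int)
    · rw [if_pos (hcond.mpr h), if_pos h, s0, s1, s2]
    · rw [if_neg (fun hh => h (hcond.mp hh)), if_neg h]
  | case2 t h =>
    match t, h with
    | [], _ => simp [parse_tle_chunks, PySem.List.pyRange]
    | [a], _ =>
        norm_num [parse_tle_chunks, show PySem.List.pyRange 0 (1:Int) 3 = [0] from by decide]
    | [a, b], _ =>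
        norm_num [parse_tle_chunks, show PySem.List.pyRange 0 (2:Int) 3 = [0] from by decide]
    | a :: b :: c :: r, h => exact absurd rfl (h a b c r)

theorem parse_tle_data_spec : Claim_equal_parse_tle_data := by
  intro t _
  unfold Spec_parse_tle_data parse_tle_data parse_tle_data_alt
  simpa using loopA_eq_chunks (PySem.Str.splitlines t) []
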